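-- pv_equiv track=rewrite | github.com/ETCBC/parallels | programs/parallels.py | condensex
-- ===== SOURCE A (Python) =====
-- def condensex(vlabels):
--     cnd = []
--     (cur_b, cur_c) = (None, None)
--     for (b, c, v, d) in vlabels:
--         sep = (
--             ""
--             if cur_b is None
--             else ". "
--             if cur_b != b
--             else "; "
--             if cur_c != c
--             else ", "
--         )
--         show_b = b + " " if cur_b != b else ""
--         show_c = c + ":" if cur_b != b or cur_c != c else ""
--         (cur_b, cur_c) = (b, c)
--         cnd.append("{}{}{}{}{}".format(sep, show_b, show_c, v, d))
--     return cnd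
-- ===== SOURCE B (Python) =====
-- def _groups(items, key):
--     res = []
--     i = 0
--     n = len(items)
--     while i < n:
--         k = key(items[i])
--         j = i + 1
--         while j < n and key(items[j]) == k:
--             j += 1
--         res.append((k, items[i:j]))
--         i = j
--     return res
--
--
-- def condensex(vlabels):
--     cnd = []
--     for bi, (b, bgroup) in enumerate(_groups(vlabels, lambda t: t[0])):
--         for ci, (c, cgroup) in enumerate(_groups(bgroup, lambda t: t[1])):
--             for vi, (_b, _c, v, d) in enumerate(cgroup):
--                 if vi != 0:
--                     sep, sb, sc = ", ", "", ""
--                 elif ci != 0: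
--                     sep, sb, sc = "; ", "", c + ":"
--                 elif bi != 0:
--                     sep, sb, sc = ". ", b + " ", c + ":"
--                 else:
--                     sep, sb, sc = "", b + " ", c + ":"
--                 cnd.append(sep + sb + sc + v + d)
--     return cnd
-- ===== Notes on version B (the rewrite author's own statement) =====
-- stated objective: alternative
-- what changed: Replaced A's single pass that compares each label to carried (cur_b, cur_c) state with two nested levels of consecutive grouping (by book, then by chapter) and position-indexed rendering of each group's first vs later entries.
import Mathlib
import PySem

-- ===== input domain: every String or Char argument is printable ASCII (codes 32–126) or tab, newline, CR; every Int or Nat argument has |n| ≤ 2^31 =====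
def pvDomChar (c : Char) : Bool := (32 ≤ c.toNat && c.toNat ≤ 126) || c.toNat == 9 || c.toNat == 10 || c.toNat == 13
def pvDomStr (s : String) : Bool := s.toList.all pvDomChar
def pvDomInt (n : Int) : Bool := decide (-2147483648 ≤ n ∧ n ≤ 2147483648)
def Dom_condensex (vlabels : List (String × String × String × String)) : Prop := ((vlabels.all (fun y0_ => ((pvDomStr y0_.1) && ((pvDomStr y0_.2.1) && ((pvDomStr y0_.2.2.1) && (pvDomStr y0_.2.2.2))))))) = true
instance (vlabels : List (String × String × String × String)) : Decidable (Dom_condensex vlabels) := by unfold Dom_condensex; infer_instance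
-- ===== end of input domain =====

-- B replaces A's flat compare-to-previous state loop by two nested levels of consecutive
-- grouping (by book, then by chapter) with position-indexed rendering; objective: alternative.

-- ===== PORT A =====
-- A's loop over vlabels carrying the (cur_b, cur_c) state, transliterated as structural recursion.
def condensexGo (cb cc : Option String) :
    List (String × String × String × String) → List String
  | [] => []
  | (b, c, v, d) :: rest =>
    let sep : String :=
      if cb = none then ""
      else if cb ≠ some b then ". "
      else if cc ≠ some c then "; "
      else ", "
    let show_b : String := if cb ≠ some b then b ++ " " else ""
    let show_c : String := if cb ≠ some b ∨ cc ≠ some c then c ++ ":" else ""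
    (sep ++ show_b ++ show_c ++ v ++ d) :: condensexGo (some b) (some c) rest

def condensex (vlabels : List (String × String × String × String)) : List String :=
  condensexGo none none vlabels

-- ===== PORT B =====
-- Source B's _groups: split off the maximal prefix with the given key (the inner `while j` scan) …
def spanKey (f : (String × String × String × String) → String) (k : String) :
    List (String × String × String × String) →
    List (String × String × String × String) × List (String × String × String × String)
  | [] => ([], [])
  | x :: xs =>
    if f x = k then
      let p := spanKey f k xs
      (x :: p.1, p.2)
    else ([], x :: xs)

theorem spanKey_snd_length (f : (String × String × String × String) → String) (k : String) :
    ∀ l : List (String × String × String × String), (spanKey f k l).2.length ≤ l.length := by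
  intro l
  induction l with
  | nil => simp [spanKey]
  | cons x xs ih =>
    by_cases h : f x = k
    · simp [spanKey, h]; omega
    · simp [spanKey, h]

-- … and the outer `while i` loop producing the consecutive groups with their keys.
def groupsKey (f : (String × String × String × String) → String) :
    List (String × String × String × String) →
    List (String × List (String × String × String × String))
  | [] => []
  | x :: xs =>
    let p := spanKey f (f x) xs
    (f x, x :: p.1) :: groupsKey f p.2
termination_by l => l.length
decreasing_by
  simp only [List.length_cons]
  have := spanKey_snd_length f (f x) xs
  omega

-- Source B's three nested for-loops with enumerate: mapIdx over books, chapters, verses.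
def condensex_alt (vlabels : List (String × String × String × String)) : List String :=
  (List.mapIdx (fun bi bg =>
    (List.mapIdx (fun ci cg =>
      List.mapIdx (fun vi t =>
        if vi ≠ 0 then ", " ++ "" ++ "" ++ t.2.2.1 ++ t.2.2.2
        else if ci ≠ 0 then "; " ++ "" ++ (cg.1 ++ ":") ++ t.2.2.1 ++ t.2.2.2
        else if bi ≠ 0 then ". " ++ (bg.1 ++ " ") ++ (cg.1 ++ ":") ++ t.2.2.1 ++ t.2.2.2
        else "" ++ (bg.1 ++ " ") ++ (cg.1 ++ ":") ++ t.2.2.1 ++ t.2.2.2) cg.2)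
      (groupsKey (fun t => t.2.1) bg.2)).flatten)
    (groupsKey (fun t => t.1) vlabels)).flatten

-- ===== PRECONDITION & SPEC =====
def Spec_condensex (vlabels : List (String × String × String × String)) (out : List String) : Prop := out = condensex_alt vlabels
instance (vlabels : List (String × String × String × String)) (out : List String) : Decidable (Spec_condensex vlabels out) := by unfold Spec_condensex; infer_instance

-- ===== CLAIM (what is proved, stated in full; the proofs are below) =====
def Claim_equal_condensex : Prop := ∀ (vlabels : List (String × String × String × String)), Dom_condensex vlabels → Spec_condensex vlabels (condensex vlabels)

-- ===== LEMMAS AND PROOFS =====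

-- Common reference rendering: each label rendered against the (book, chapter) of its predecessor.
def rend (prev : Option (String × String)) (t : String × String × String × String) : String :=
  match prev with
  | none => "" ++ (t.1 ++ " ") ++ (t.2.1 ++ ":") ++ t.2.2.1 ++ t.2.2.2
  | some (pb, pc) =>
    if pb ≠ t.1 then ". " ++ (t.1 ++ " ") ++ (t.2.1 ++ ":") ++ t.2.2.1 ++ t.2.2.2
    else if pc ≠ t.2.1 then "; " ++ "" ++ (t.2.1 ++ ":") ++ t.2.2.1 ++ t.2.2.2
    else ", " ++ "" ++ "" ++ t.2.2.1 ++ t.2.2.2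

def chain (prev : Option (String × String)) :
    List (String × String × String × String) → List String
  | [] => []
  | t :: ts => rend prev t :: chain (some (t.1, t.2.1)) ts

def ctxAfter (prev : Option (String × String)) :
    List (String × String × String × String) → Option (String × String)
  | [] => prev
  | t :: ts => ctxAfter (some (t.1, t.2.1)) ts

-- rendering helpers the proofs talk about
def commaE (t : String × String × String × String) : String :=
  ", " ++ "" ++ "" ++ t.2.2.1 ++ t.2.2.2

def chapLater (cg : String × List (String × String × String × String)) : List String :=
  cg.2.mapIdx (fun vi t =>
    if vi ≠ 0 then commaE t else "; " ++ "" ++ (cg.1 ++ ":") ++ t.2.2.1 ++ t.2.2.2)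

-- A-side: the state loop computes the predecessor-chain rendering.
theorem condensexGo_some (l : List (String × String × String × String)) :
    ∀ pb pc, condensexGo (some pb) (some pc) l = chain (some (pb, pc)) l := by
  induction l with
  | nil => intro pb pc; simp [condensexGo, chain]
  | cons t ts ih =>
    intro pb pc
    obtain ⟨b, c, v, d⟩ := t
    by_cases hb : pb = b <;> by_cases hc : pc = c <;>
      simp [condensexGo, chain, rend, hb, hc, ih]

theorem condensexGo_none (l : List (String × String × String × String)) :
    ∀ cc, condensexGo none cc l = chain none l := by
  cases l with
  | nil => intro cc; simp [condensexGo, chain]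
  | cons t ts =>
    intro cc
    obtain ⟨b, c, v, d⟩ := t
    simp [condensexGo, chain, rend, condensexGo_some]

-- spanKey facts
theorem spanKey_append (f : (String × String × String × String) → String) (k : String)
    (l : List (String × String × String × String)) :
    (spanKey f k l).1 ++ (spanKey f k l).2 = l := by
  induction l with
  | nil => simp [spanKey]
  | cons x xs ih =>
    by_cases h : f x = k <;> simp [spanKey, h, ih]

theorem spanKey_mem (f : (String × String × String × String) → String) (k : String)
    (l : List (String × String × String × String)) :
    ∀ t ∈ (spanKey f k l).1, f t = k := by
  induction l with
  | nil => simp [spanKey]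
  | cons x xs ih =>
    intro t ht
    by_cases h : f x = k
    · simp [spanKey, h] at ht
      rcases ht with hx | hx
      · rw [hx]; exact h
      · exact ih t hx
    · simp [spanKey, h] at ht

theorem spanKey_head (f : (String × String × String × String) → String) (k : String)
    (l : List (String × String × String × String)) :
    ∀ y ys, (spanKey f k l).2 = y :: ys → f y ≠ k := by
  induction l with
  | nil => simp [spanKey]
  | cons x xs ih =>
    intro y ys hy
    by_cases h : f x = k
    · simp only [spanKey, if_pos h] at hy
      exact ih y ys hy
    · simp [spanKey, h] at hy
      rw [← hy.1]; exact h

theorem chain_append (a b : List (String × String × String × String)) :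
    ∀ prev, chain prev (a ++ b) = chain prev a ++ chain (ctxAfter prev a) b := by
  induction a with
  | nil => intro prev; simp [chain, ctxAfter]
  | cons t ts ih => intro prev; simp [chain, ctxAfter, ih]

theorem ctxAfter_const (b c : String) (l : List (String × String × String × String))
    (h : ∀ t ∈ l, t.1 = b ∧ t.2.1 = c) :
    ctxAfter (some (b, c)) l = some (b, c) := by
  induction l with
  | nil => simp [ctxAfter]
  | cons t ts ih =>
    obtain ⟨h1, h2⟩ := h t (by simp)
    rw [ctxAfter, h1, h2]
    exact ih (fun t ht => h t (by simp [ht]))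

theorem ctxAfter_book (b : String) (l : List (String × String × String × String))
    (hne : l ≠ []) (h : ∀ t ∈ l, t.1 = b) :
    ∀ prev, ∃ pc, ctxAfter prev l = some (b, pc) := by
  induction l with
  | nil => exact absurd rfl hne
  | cons t ts ih =>
    intro prev
    cases ts with
    | nil =>
      refine ⟨t.2.1, ?_⟩
      simp [ctxAfter, h t (by simp)]
    | cons u us =>
      simp only [ctxAfter]
      exact ih (by simp) (fun t ht => h t (by simp [ht])) (some (t.1, t.2.1))

-- mapIdx whose function ignores the index is a map
theorem mapIdx_eq_map {α β : Type} (f : Nat → α → β) (g : α → β)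
    (h : ∀ i a, f i a = g a) : ∀ l : List α, List.mapIdx f l = l.map g := by
  intro l
  induction l generalizing f with
  | nil => simp
  | cons x xs ih =>
    rw [List.mapIdx_cons, h, ih (fun i => f (i + 1)) (fun i a => h (i + 1) a)]
    simp

-- verses after the first in a chapter all render as ", v d"
theorem chain_comma (b c : String) :
    ∀ l : List (String × String × String × String),
      (∀ t ∈ l, t.1 = b ∧ t.2.1 = c) →
      chain (some (b, c)) l = l.map commaE := by
  intro l
  induction l with
  | nil => simp [chain]
  | cons t ts ih =>
    intro h
    obtain ⟨h1, h2⟩ := h t (by simp)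
    rw [chain, rend, h1, h2, ih (fun t ht => h t (by simp [ht]))]
    simp [commaE]

-- chapters after the first within one book render as "; c:" groups
theorem chaps_tail :
    ∀ (n : Nat) (r : List (String × String × String × String)) (b pc : String),
      r.length ≤ n →
      (∀ t ∈ r, t.1 = b) →
      (∀ y ys, r = y :: ys → y.2.1 ≠ pc) →
      ((groupsKey (fun t => t.2.1) r).map chapLater).flatten = chain (some (b, pc)) r := by
  intro n
  induction n with
  | zero =>
    intro r b pc hlen _ _
    have : r = [] := List.length_eq_zero_iff.mp (Nat.le_zero.mp hlen)
    subst this; simp [groupsKey, chain]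
  | succ n ih =>
    intro r b pc hlen hb hhd
    cases r with
    | nil => simp [groupsKey, chain]
    | cons x xs =>
      set g := (spanKey (fun t => t.2.1) x.2.1 xs).1 with hg
      set rest := (spanKey (fun t => t.2.1) x.2.1 xs).2 with hrest
      have hsplit : g ++ rest = xs := spanKey_append _ _ xs
      have hgmemxs : ∀ t ∈ g, t ∈ xs := by
        intro t ht; rw [← hsplit]; exact List.mem_append_left _ ht
      have hgbc : ∀ t ∈ g, t.1 = b ∧ t.2.1 = x.2.1 := by
        intro t ht
        exact ⟨hb t (by simp [hgmemxs t ht]), spanKey_mem _ _ xs t ht⟩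
      have hxb : x.1 = b := hb x (by simp)
      have hxc : x.2.1 ≠ pc := hhd x xs rfl
      have hgroups : groupsKey (fun t => t.2.1) (x :: xs) =
          (x.2.1, x :: g) :: groupsKey (fun t => t.2.1) rest := by
        simp [groupsKey]
        exact ⟨rfl, rfl⟩
      have hxs : x :: xs = (x :: g) ++ rest := by simp [← hsplit]
      rw [hgroups, hxs, List.map_cons, List.flatten_cons, chain_append]
      have h1 : chapLater (x.2.1, x :: g) = chain (some (b, pc)) (x :: g) := by
        rw [chapLater, List.mapIdx_cons, chain]
        have hr : rend (some (b, pc)) x =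
            "; " ++ "" ++ (x.2.1 ++ ":") ++ x.2.2.1 ++ x.2.2.2 := by
          rw [rend]
          simp [hxb, Ne.symm hxc]
        rw [mapIdx_eq_map _ commaE (by intro i a; simp)]
        rw [hr, hxb, chain_comma b x.2.1 g hgbc]
        simp
      have hctx : ctxAfter (some (b, pc)) (x :: g) = some (b, x.2.1) := by
        simp only [ctxAfter, hxb]
        exact ctxAfter_const b x.2.1 g hgbc
      have hrestlen : rest.length ≤ n := by
        have h1 : rest.length ≤ xs.length := by
          rw [hrest]; exact spanKey_snd_length _ _ xs
        simp at hlen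
        omega
      have h2 : ((groupsKey (fun t => t.2.1) rest).map chapLater).flatten =
          chain (some (b, x.2.1)) rest := by
        refine ih rest b x.2.1 hrestlen ?_ ?_
        · intro t ht
          refine hb t ?_
          rw [hxs]; exact List.mem_append_right _ ht
        · intro y ys hy
          exact spanKey_head (fun t => t.2.1) x.2.1 xs y ys (by rw [← hrest, hy])
      rw [h1, hctx, h2]

-- book body: given a header renderer matching `rend prev` on the first label,
-- the chapter-level mapIdx renders the whole book group as the chain from prev.
theorem book_body (HEAD : String → (String × String × String × String) → String)
    (bg : List (String × String × String × String)) (b : String)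
    (prev : Option (String × String))
    (hb : ∀ t ∈ bg, t.1 = b)
    (hH : ∀ x g, bg = x :: g → HEAD x.2.1 x = rend prev x) :
    (List.mapIdx (fun ci cg =>
      List.mapIdx (fun vi t =>
        if vi ≠ 0 then commaE t
        else if ci ≠ 0 then "; " ++ "" ++ (cg.1 ++ ":") ++ t.2.2.1 ++ t.2.2.2
        else HEAD cg.1 t) cg.2) (groupsKey (fun t => t.2.1) bg)).flatten = chain prev bg := by
  cases bg with
  | nil => simp [groupsKey, chain]
  | cons x xs =>
    set g := (spanKey (fun t => t.2.1) x.2.1 xs).1 with hg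
    set rest := (spanKey (fun t => t.2.1) x.2.1 xs).2 with hrest
    have hsplit : g ++ rest = xs := spanKey_append _ _ xs
    have hgmemxs : ∀ t ∈ g, t ∈ xs := by
      intro t ht; rw [← hsplit]; exact List.mem_append_left _ ht
    have hgbc : ∀ t ∈ g, t.1 = b ∧ t.2.1 = x.2.1 := by
      intro t ht
      exact ⟨hb t (by simp [hgmemxs t ht]), spanKey_mem _ _ xs t ht⟩
    have hxb : x.1 = b := hb x (by simp)
    have hgroups : groupsKey (fun t => t.2.1) (x :: xs) =
        (x.2.1, x :: g) :: groupsKey (fun t => t.2.1) rest := by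
      simp [groupsKey]
      exact ⟨rfl, rfl⟩
    have hxs : x :: xs = (x :: g) ++ rest := by simp [← hsplit]
    rw [hgroups, List.mapIdx_cons, List.flatten_cons]
    have hfirst : List.mapIdx (fun vi t =>
        if vi ≠ 0 then commaE t
        else if (0 : Nat) ≠ 0 then "; " ++ "" ++ ((x.2.1, x :: g).1 ++ ":") ++ t.2.2.1 ++ t.2.2.2
        else HEAD (x.2.1, x :: g).1 t) (x.2.1, x :: g).2 =
        rend prev x :: g.map commaE := by
      rw [List.mapIdx_cons]
      rw [mapIdx_eq_map _ commaE (by intro i a; simp)]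
      simp [hH x xs rfl]
    have hshift : List.mapIdx (fun ci cg =>
        List.mapIdx (fun vi t =>
          if vi ≠ 0 then commaE t
          else if ci + 1 ≠ 0 then "; " ++ "" ++ (cg.1 ++ ":") ++ t.2.2.1 ++ t.2.2.2
          else HEAD cg.1 t) cg.2) (groupsKey (fun t => t.2.1) rest) =
        (groupsKey (fun t => t.2.1) rest).map chapLater := by
      refine mapIdx_eq_map _ chapLater ?_ _
      intro i cg
      rw [chapLater]
      simp
    rw [hfirst, hshift, hxs, chain_append]
    have hcg : chain prev (x :: g) = rend prev x :: List.map commaE g := by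
      rw [chain, hxb, chain_comma b x.2.1 g hgbc]
    have hctx : ctxAfter prev (x :: g) = some (b, x.2.1) := by
      simp only [ctxAfter, hxb]
      exact ctxAfter_const b x.2.1 g hgbc
    rw [hcg, hctx]
    have h2 : ((groupsKey (fun t => t.2.1) rest).map chapLater).flatten =
        chain (some (b, x.2.1)) rest := by
      refine chaps_tail rest.length rest b x.2.1 le_rfl ?_ ?_
      · intro t ht
        refine hb t ?_
        rw [hxs]; exact List.mem_append_right _ ht
      · intro y ys hy
        exact spanKey_head (fun t => t.2.1) x.2.1 xs y ys (by rw [← hrest, hy])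
    simp [h2]

def bookLater (bg : String × List (String × String × String × String)) : List String :=
  (List.mapIdx (fun ci cg =>
    List.mapIdx (fun vi t =>
      if vi ≠ 0 then commaE t
      else if ci ≠ 0 then "; " ++ "" ++ (cg.1 ++ ":") ++ t.2.2.1 ++ t.2.2.2
      else ". " ++ (bg.1 ++ " ") ++ (cg.1 ++ ":") ++ t.2.2.1 ++ t.2.2.2) cg.2)
    (groupsKey (fun t => t.2.1) bg.2)).flatten

theorem books_tail :
    ∀ (n : Nat) (r : List (String × String × String × String)) (pb pc : String),
      r.length ≤ n →
      (∀ y ys, r = y :: ys → y.1 ≠ pb) →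
      ((groupsKey (fun t => t.1) r).map bookLater).flatten = chain (some (pb, pc)) r := by
  intro n
  induction n with
  | zero =>
    intro r pb pc hlen _
    have : r = [] := List.length_eq_zero_iff.mp (Nat.le_zero.mp hlen)
    subst this; simp [groupsKey, chain]
  | succ n ih =>
    intro r pb pc hlen hhd
    cases r with
    | nil => simp [groupsKey, chain]
    | cons x xs =>
      set g := (spanKey (fun t => t.1) x.1 xs).1 with hg
      set rest := (spanKey (fun t => t.1) x.1 xs).2 with hrest
      have hsplit : g ++ rest = xs := spanKey_append _ _ xs
      have hgb : ∀ t ∈ x :: g, t.1 = x.1 := by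
        intro t ht
        rcases List.mem_cons.mp ht with h | h
        · rw [h]
        · exact spanKey_mem _ _ xs t h
      have hxpb : x.1 ≠ pb := hhd x xs rfl
      have hgroups : groupsKey (fun t => t.1) (x :: xs) =
          (x.1, x :: g) :: groupsKey (fun t => t.1) rest := by
        simp [groupsKey]
        exact ⟨rfl, rfl⟩
      have hxs : x :: xs = (x :: g) ++ rest := by simp [← hsplit]
      rw [hgroups, List.map_cons, List.flatten_cons, hxs, chain_append]
      have h1 : bookLater (x.1, x :: g) = chain (some (pb, pc)) (x :: g) := by
        rw [bookLater]
        exact book_body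
          (fun c t => ". " ++ (x.1 ++ " ") ++ (c ++ ":") ++ t.2.2.1 ++ t.2.2.2)
          (x :: g) x.1 (some (pb, pc)) hgb (by
        intro y ys hy
        have hyx : y = x := by
          have := congrArg (fun l => l.head?) hy
          simpa using this.symm
        subst hyx
        rw [rend]
        simp [Ne.symm hxpb])
      obtain ⟨pc', hctx⟩ := ctxAfter_book x.1 (x :: g) (by simp) hgb (some (pb, pc))
      have hrestlen : rest.length ≤ n := by
        have h1 : rest.length ≤ xs.length := by
          rw [hrest]; exact spanKey_snd_length _ _ xs
        simp at hlen
        omega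
      have h2 : ((groupsKey (fun t => t.1) rest).map bookLater).flatten =
          chain (some (x.1, pc')) rest := by
        refine ih rest x.1 pc' hrestlen ?_
        intro y ys hy
        exact spanKey_head (fun t => t.1) x.1 xs y ys (by rw [← hrest, hy])
      rw [h1, hctx, h2]

theorem alt_eq_chain (l : List (String × String × String × String)) :
    condensex_alt l = chain none l := by
  cases l with
  | nil => simp [condensex_alt, groupsKey, chain]
  | cons x xs =>
    set g := (spanKey (fun t => t.1) x.1 xs).1 with hg
    set rest := (spanKey (fun t => t.1) x.1 xs).2 with hrest
    have hsplit : g ++ rest = xs := spanKey_append _ _ xs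
    have hgb : ∀ t ∈ x :: g, t.1 = x.1 := by
      intro t ht
      rcases List.mem_cons.mp ht with h | h
      · rw [h]
      · exact spanKey_mem _ _ xs t h
    have hgroups : groupsKey (fun t => t.1) (x :: xs) =
        (x.1, x :: g) :: groupsKey (fun t => t.1) rest := by
      simp [groupsKey]
      exact ⟨rfl, rfl⟩
    have hxs : x :: xs = (x :: g) ++ rest := by simp [← hsplit]
    rw [condensex_alt, hgroups, List.mapIdx_cons, List.flatten_cons]
    have hfirst : (List.mapIdx (fun ci cg =>
        List.mapIdx (fun vi t =>
          if vi ≠ 0 then ", " ++ "" ++ "" ++ t.2.2.1 ++ t.2.2.2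
          else if ci ≠ 0 then "; " ++ "" ++ (cg.1 ++ ":") ++ t.2.2.1 ++ t.2.2.2
          else if (0 : Nat) ≠ 0 then ". " ++ ((x.1, x :: g).1 ++ " ") ++ (cg.1 ++ ":") ++ t.2.2.1 ++ t.2.2.2
          else "" ++ ((x.1, x :: g).1 ++ " ") ++ (cg.1 ++ ":") ++ t.2.2.1 ++ t.2.2.2) cg.2)
        (groupsKey (fun t => t.2.1) (x.1, x :: g).2)).flatten = chain none (x :: g) := by
      refine Eq.trans ?_ (book_body
        (fun c t => "" ++ (x.1 ++ " ") ++ (c ++ ":") ++ t.2.2.1 ++ t.2.2.2)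
        (x :: g) x.1 none hgb ?_)
      · refine congrArg List.flatten ?_
        refine congrArg₂ List.mapIdx ?_ rfl
        funext ci cg
        refine congrArg₂ List.mapIdx ?_ rfl
        funext vi t
        simp [commaE]
      · intro y ys hy
        have hyx : y = x := by
          have := congrArg (fun l => l.head?) hy
          simpa using this.symm
        subst hyx
        rw [rend]
    have hshift : List.mapIdx (fun bi bg =>
        (List.mapIdx (fun ci cg =>
          List.mapIdx (fun vi t =>
            if vi ≠ 0 then ", " ++ "" ++ "" ++ t.2.2.1 ++ t.2.2.2
            else if ci ≠ 0 then "; " ++ "" ++ (cg.1 ++ ":") ++ t.2.2.1 ++ t.2.2.2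
            else if bi + 1 ≠ 0 then ". " ++ (bg.1 ++ " ") ++ (cg.1 ++ ":") ++ t.2.2.1 ++ t.2.2.2
            else "" ++ (bg.1 ++ " ") ++ (cg.1 ++ ":") ++ t.2.2.1 ++ t.2.2.2) cg.2)
          (groupsKey (fun t => t.2.1) bg.2)).flatten)
        (groupsKey (fun t => t.1) rest) =
        (groupsKey (fun t => t.1) rest).map bookLater := by
      refine mapIdx_eq_map _ bookLater ?_ _
      intro i bg
      rw [bookLater]
      refine congrArg List.flatten ?_
      refine congrArg₂ List.mapIdx ?_ rfl
      funext ci cg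
      refine congrArg₂ List.mapIdx ?_ rfl
      funext vi t
      simp [commaE]
    rw [hfirst, hshift, hxs, chain_append]
    obtain ⟨pc', hctx⟩ := ctxAfter_book x.1 (x :: g) (by simp) hgb none
    rw [hctx]
    have h2 : ((groupsKey (fun t => t.1) rest).map bookLater).flatten =
        chain (some (x.1, pc')) rest := by
      refine books_tail rest.length rest x.1 pc' le_rfl ?_
      intro y ys hy
      exact spanKey_head (fun t => t.1) x.1 xs y ys (by rw [← hrest, hy])
    rw [h2]

-- ===== VERDICT (by name: the statement is the Claim_ definition above) =====
theorem condensex_spec : Claim_equal_condensex := by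
  intro vlabels _
  unfold Spec_condensex condensex
  rw [condensexGo_none, alt_eq_chain]
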